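-- pv_equiv track=rewrite | github.com/priyadp1/agent_consensus | check.py | round_disagree
-- ===== SOURCE A (Python) =====
-- def round_disagree(data, round_idx):
--     rounds = data.get("rounds", [])
--     if len(rounds) <= round_idx:
--         return False
--
--     answers = [
--         agent_data.get("answer")
--         for agent_data in rounds[round_idx].values()
--         if agent_data.get("answer") not in (None, "INVALID")
--     ]
--
--     if len(answers) < 2:
--         return False
--
--     return len(set(answers)) > 1
-- ===== SOURCE B (Python) =====
-- def round_disagree(data, round_idx):
--     rounds = data.get("rounds", [])
--     if len(rounds) <= round_idx:
--         return False
--     it = (agent_data.get("answer") for agent_data in rounds[round_idx].values())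
--     for first in it:
--         if first is not None and first != "INVALID":
--             # disagreement iff some later valid answer differs from the first
--             # valid one (>1 distinct already implies >=2 valid answers)
--             return any(a is not None and a != "INVALID" and a != first for a in it)
--     return False
-- ===== Notes on version B (the rewrite author's own statement) =====
-- stated objective: simpler
-- what changed: Drops A's intermediate answers list, length test and set-cardinality test entirely: B locates the first valid answer and short-circuit-searches the remaining agents for a valid answer that differs, using the fact that more than one distinct valid answer already implies at least two valid answers.
import Mathlib
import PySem

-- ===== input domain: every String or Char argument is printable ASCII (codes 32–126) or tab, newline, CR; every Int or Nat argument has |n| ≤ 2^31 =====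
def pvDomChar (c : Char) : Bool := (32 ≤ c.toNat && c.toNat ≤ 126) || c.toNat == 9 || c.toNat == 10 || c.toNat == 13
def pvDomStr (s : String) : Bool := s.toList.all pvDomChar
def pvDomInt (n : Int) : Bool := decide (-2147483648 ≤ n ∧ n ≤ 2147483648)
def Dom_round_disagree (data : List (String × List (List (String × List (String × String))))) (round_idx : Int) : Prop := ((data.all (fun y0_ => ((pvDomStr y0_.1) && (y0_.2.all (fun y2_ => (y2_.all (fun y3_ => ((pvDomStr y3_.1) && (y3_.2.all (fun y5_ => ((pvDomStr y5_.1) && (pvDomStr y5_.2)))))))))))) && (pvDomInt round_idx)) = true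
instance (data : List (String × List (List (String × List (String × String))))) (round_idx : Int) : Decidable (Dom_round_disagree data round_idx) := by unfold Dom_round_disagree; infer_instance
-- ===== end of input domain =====

-- B is a simpler equivalent: instead of building the valid-answer list and testing its length
-- and its set's cardinality, it finds the first valid answer and searches the remaining agents
-- for a valid answer that differs from it (>1 distinct implies >=2 valid, so no count is needed).

-- ===== PORT A =====
def round_disagree (data : List (String × List (List (String × List (String × String))))) (round_idx : Int) : Bool :=
  let rounds := PySem.Dict.getD (PySem.Dict.mk data) "rounds" []
  if (rounds.length : Int) ≤ round_idx then false
  else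
    match PySem.List.pyGet? rounds round_idx with
    | none => false  -- Python raises IndexError here; excluded by Pre_round_disagree
    | some rd =>
      let answers := (PySem.Dict.values (PySem.Dict.mk rd)).filterMap (fun agent_data =>
        match PySem.Dict.get? (PySem.Dict.mk agent_data) "answer" with
        | none => none
        | some a => if a = "INVALID" then none else some a)
      if answers.length < 2 then false
      else decide (1 < (PySem.Set.ofList answers).length)

-- ===== PORT B =====
-- B's 'for first in it: if valid: return any(...)' loop: scan for the first valid answer,
-- then a short-circuit 'any' over the remaining agents.
def pvGoB : List (List (String × String)) → Bool
  | [] => false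
  | agent_data :: rest =>
    match PySem.Dict.get? (PySem.Dict.mk agent_data) "answer" with
    | none => pvGoB rest
    | some first =>
      if first = "INVALID" then pvGoB rest
      else rest.any (fun ad2 =>
        match PySem.Dict.get? (PySem.Dict.mk ad2) "answer" with
        | none => false
        | some a => decide (a ≠ "INVALID") && decide (a ≠ first))

def round_disagree_alt (data : List (String × List (List (String × List (String × String))))) (round_idx : Int) : Bool :=
  let rounds := PySem.Dict.getD (PySem.Dict.mk data) "rounds" []
  if (rounds.length : Int) ≤ round_idx then false
  else
    match PySem.List.pyGet? rounds round_idx with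
    | none => false  -- Python raises IndexError here; excluded by Pre_round_disagree
    | some rd =>
      pvGoB (PySem.Dict.values (PySem.Dict.mk rd))

-- ===== PRECONDITION & SPEC =====
-- Pre_ excludes exactly the inputs where A raises IndexError: round_idx below -len(rounds).
def Pre_round_disagree (data : List (String × List (List (String × List (String × String))))) (round_idx : Int) : Prop :=
  -((PySem.Dict.getD (PySem.Dict.mk data) "rounds" []).length : Int) ≤ round_idx
instance (data : List (String × List (List (String × List (String × String))))) (round_idx : Int) : Decidable (Pre_round_disagree data round_idx) := by unfold Pre_round_disagree; infer_instance
def pvWitness_round_disagree : (List (String × List (List (String × List (String × String))))) × Int :=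
  ([("rounds", [[("a1", [("answer", "x")]), ("a2", [("answer", "y")])]])], 0)
def Spec_round_disagree (data : List (String × List (List (String × List (String × String))))) (round_idx : Int) (out : Bool) : Prop := out = round_disagree_alt data round_idx
instance (data : List (String × List (List (String × List (String × String))))) (round_idx : Int) (out : Bool) : Decidable (Spec_round_disagree data round_idx out) := by unfold Spec_round_disagree; infer_instance

-- ===== CLAIM (what is proved, stated in full; the proofs are below) =====
def Claim_equal_round_disagree : Prop := ∀ (data : List (String × List (List (String × List (String × String))))) (round_idx : Int), Dom_round_disagree data round_idx → Pre_round_disagree data round_idx → Spec_round_disagree data round_idx (round_disagree data round_idx)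

-- ===== LEMMAS AND PROOFS =====

-- the valid-answer extractor used by A's comprehension
def pvF (ad : List (String × String)) : Option String :=
  match PySem.Dict.get? (PySem.Dict.mk ad) "answer" with
  | none => none
  | some a => if a = "INVALID" then none else some a

-- B's inner 'any' over raw agents equals an 'any' over the filtered answers
theorem pv_any_filter (vals : List (List (String × String))) (first : String) :
    vals.any (fun ad2 =>
        match PySem.Dict.get? (PySem.Dict.mk ad2) "answer" with
        | none => false
        | some a => decide (a ≠ "INVALID") && decide (a ≠ first))
    = (vals.filterMap pvF).any (fun b => decide (b ≠ first)) := by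
  induction vals with
  | nil => rfl
  | cons v vs ih =>
    rw [List.any_cons, List.filterMap_cons]
    cases h : PySem.Dict.get? (PySem.Dict.mk v) "answer" with
    | none =>
      have hv : pvF v = none := by simp [pvF, h]
      rw [hv]
      simpa [h] using ih
    | some a =>
      by_cases ha : a = "INVALID"
      · have hv : pvF v = none := by simp [pvF, h, ha]
        rw [hv]
        simpa [h, ha] using ih
      · have hv : pvF v = some a := by simp [pvF, h, ha]
        rw [hv, List.any_cons]
        show ((decide (a ≠ "INVALID") && decide (a ≠ first)) || _) = _
        rw [ih]
        simp [ha]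

-- B's outer scan equals: empty filtered list → false, else 'any differs from head'
theorem pv_goB_filter (vals : List (List (String × String))) :
    pvGoB vals
    = (match vals.filterMap pvF with
       | [] => false
       | a :: rest => rest.any (fun b => decide (b ≠ a))) := by
  induction vals with
  | nil => rfl
  | cons v vs ih =>
    simp only [pvGoB, List.filterMap_cons]
    unfold pvF
    cases h : PySem.Dict.get? (PySem.Dict.mk v) "answer" with
    | none => simpa using ih
    | some a =>
      by_cases ha : a = "INVALID"
      · simpa [ha] using ih
      · simp only [ha, if_false]
        exact pv_any_filter vs a

theorem pv_set_gt_one (a : String) (rest : List String) :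
    (1 < (PySem.Set.ofList (a :: rest)).length) ↔ ∃ b ∈ rest, b ≠ a := by
  rw [PySem.Set.ofList_cons]
  simp only [List.length_cons]
  constructor
  · intro hlen
    have : 0 < (PySem.Set.discard (PySem.Set.ofList rest) a).length := by omega
    obtain ⟨b, hb⟩ := List.exists_mem_of_length_pos this
    rw [PySem.Set.mem_discard] at hb
    exact ⟨b, (PySem.Set.mem_ofList _ _).1 hb.1, hb.2⟩
  · rintro ⟨b, hb, hne⟩
    have : b ∈ PySem.Set.discard (PySem.Set.ofList rest) a :=
      (PySem.Set.mem_discard _ _ _).2 ⟨(PySem.Set.mem_ofList _ _).2 hb, hne⟩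
    have := List.length_pos_of_mem this
    omega

-- ===== VERDICT (by name: the statement is the Claim_ definition above) =====
theorem round_disagree_spec : Claim_equal_round_disagree := by
  intro data round_idx _ _
  unfold Spec_round_disagree round_disagree round_disagree_alt
  set rounds := PySem.Dict.getD (PySem.Dict.mk data) "rounds" [] with hr
  by_cases hle : (rounds.length : Int) ≤ round_idx
  · simp [hle]
  · simp only [hle, if_false]
    cases hg : PySem.List.pyGet? rounds round_idx with
    | none => rfl
    | some rd =>
      simp only []
      rw [pv_goB_filter]
      have hfm : ((PySem.Dict.values (PySem.Dict.mk rd)).filterMap (fun agent_data =>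
        match PySem.Dict.get? (PySem.Dict.mk agent_data) "answer" with
        | none => none
        | some a => if a = "INVALID" then none else some a))
        = (PySem.Dict.values (PySem.Dict.mk rd)).filterMap pvF := rfl
      rw [hfm]
      cases hans : (PySem.Dict.values (PySem.Dict.mk rd)).filterMap pvF with
      | nil => simp
      | cons a rest =>
        cases rest with
        | nil => simp
        | cons b bs =>
          have hA : ¬ ((a :: b :: bs).length < 2) := by simp
          rw [if_neg hA]
          have hm : (match a :: b :: bs with
              | [] => false
              | a :: rest => rest.any fun b => decide (b ≠ a))
            = (b :: bs).any (fun x => decide (x ≠ a)) := rfl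
          rw [hm]
          cases hany : (b :: bs).any (fun x => decide (x ≠ a)) with
          | false =>
            have h1 : ∀ x ∈ b :: bs, ¬ x ≠ a := by
              simpa [List.any_eq_false] using hany
            have h2 : ¬ (1 < (PySem.Set.ofList (a :: b :: bs)).length) := by
              rw [pv_set_gt_one]; rintro ⟨x, hx, hne⟩; exact h1 x hx hne
            exact decide_eq_false h2
          | true =>
            have h1 : ∃ x ∈ b :: bs, x ≠ a := by
              simpa [List.any_eq_true] using hany
            exact decide_eq_true ((pv_set_gt_one _ _).2 h1)
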